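-- pv_equiv track=rewrite | github.com/sbhakim/Cybercane | api/app/pipeline/pii.py | _mask_digits_tail
-- ===== SOURCE A (Python) =====
-- def _mask_digits_tail(value: str, keep: int = 4) -> str:
--     """Mask all but the last digits while preserving formatting."""
--     digits = [c for c in value if c.isdigit()]
--     if len(digits) <= keep:
--         return "*" * len(value)
--     masked = []
--     seen = 0
--     for c in reversed(value):
--         if c.isdigit() and seen < keep:
--             masked.append(c)
--             seen += 1
--         elif c.isdigit():
--             masked.append("*")
--         else:
--             masked.append(c)
--     return "".join(reversed(masked))
-- ===== SOURCE B (Python) =====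
-- def _mask_digits_tail(value: str, keep: int = 4) -> str:
--     """Precompute the transformed digit stream, then stitch it back into the formatting."""
--     digits = [c for c in value if c.isdigit()]
--     n = len(digits)
--     if n <= keep:
--         return "*" * len(value)
--     kept = max(keep, 0)  # keeping a negative number of digits means keeping none
--     stream = iter(["*"] * (n - kept) + digits[n - kept:])
--     return "".join(next(stream) if c.isdigit() else c for c in value)
-- ===== Notes on version B (the rewrite author's own statement) =====
-- stated objective: alternative
-- what changed: Instead of A's backward pass with a seen-counter that decides each digit's fate in reverse and re-reverses the result, B precomputes the masked digit stream (stars then the kept tail digits) and stitches it back into the formatting in one forward pass.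
import Mathlib
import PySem

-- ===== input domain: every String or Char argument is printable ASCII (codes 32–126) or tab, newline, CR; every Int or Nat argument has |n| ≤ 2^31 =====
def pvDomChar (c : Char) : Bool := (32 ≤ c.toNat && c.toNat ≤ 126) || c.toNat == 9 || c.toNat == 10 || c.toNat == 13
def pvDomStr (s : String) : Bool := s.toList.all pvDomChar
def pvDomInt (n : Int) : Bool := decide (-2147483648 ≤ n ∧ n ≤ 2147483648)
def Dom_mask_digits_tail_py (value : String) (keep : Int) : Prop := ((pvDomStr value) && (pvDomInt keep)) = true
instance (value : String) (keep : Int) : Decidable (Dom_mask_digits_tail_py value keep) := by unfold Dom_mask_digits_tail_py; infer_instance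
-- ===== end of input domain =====

-- B replaces A's backward seen-counter pass (plus re-reverse) by precomputing the masked
-- digit stream and stitching it back into the formatting in one forward pass (objective: alternative).

-- ===== PORT A =====
-- backward pass over reversed(value) with a (masked, seen) accumulator, then reverse the result
def mask_digits_tail_py (value : String) (keep : Int) : String :=
  let digits := value.toList.filter (fun c => PySem.Chars.isdigit c)
  if (digits.length : Int) ≤ keep then
    String.mk (PySem.List.pyRepeat ['*'] (value.toList.length : Int))
  else
    let res := (value.toList.reverse).foldl
      (fun (st : List Char × Int) c =>
        if PySem.Chars.isdigit c && decide (st.2 < keep) then (st.1 ++ [c], st.2 + 1)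
        else if PySem.Chars.isdigit c then (st.1 ++ ['*'], st.2)
        else (st.1 ++ [c], st.2)) ([], 0)
    String.mk res.1.reverse

-- ===== PORT B =====
-- one forward pass consuming the precomputed stream on each digit; the [] stream case is
-- unreachable (the stream always holds at least as many characters as value has digits)
def pvStitch : List Char → List Char → List Char
  | [], _ => []
  | c :: cs, st =>
    if PySem.Chars.isdigit c then
      match st with
      | d :: ds => d :: pvStitch cs ds
      | [] => []
    else c :: pvStitch cs st

def mask_digits_tail_py_alt (value : String) (keep : Int) : String :=
  let digits := value.toList.filter (fun c => PySem.Chars.isdigit c)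
  let n := digits.length
  if (n : Int) ≤ keep then
    String.mk (PySem.List.pyRepeat ['*'] (value.toList.length : Int))
  else
    let kept := max keep 0  -- keeping a negative number of digits means keeping none
    let stream := PySem.List.pyRepeat ['*'] ((n : Int) - kept) ++
      PySem.List.slice digits (some ((n : Int) - kept)) none
    String.mk (pvStitch value.toList stream)

-- ===== PRECONDITION & SPEC =====
def Spec_mask_digits_tail_py (value : String) (keep : Int) (out : String) : Prop := out = mask_digits_tail_py_alt value keep
instance (value : String) (keep : Int) (out : String) : Decidable (Spec_mask_digits_tail_py value keep out) := by unfold Spec_mask_digits_tail_py; infer_instance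

-- ===== CLAIM (what is proved, stated in full; the proofs are below) =====
def Claim_equal_mask_digits_tail_py : Prop := ∀ (value : String) (keep : Int), Dom_mask_digits_tail_py value keep → Spec_mask_digits_tail_py value keep (mask_digits_tail_py value keep)

-- ===== LEMMAS AND PROOFS =====

-- reference form: star the first m digits (counted from the left), keep the rest, via one recursion
def pvMaskL : List Char → Nat → List Char
  | [], _ => []
  | c :: cs, m =>
    if PySem.Chars.isdigit c then (if m = 0 then c else '*') :: pvMaskL cs (m - 1)
    else c :: pvMaskL cs m

theorem pvStitch_eq_maskL (l : List Char) : ∀ m : Nat,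
    pvStitch l (List.replicate m '*' ++ (l.filter (fun c => PySem.Chars.isdigit c)).drop m)
      = pvMaskL l m := by
  induction l with
  | nil => intro m; simp [pvStitch, pvMaskL]
  | cons c cs ih =>
    intro m
    by_cases hd : PySem.Chars.isdigit c = true
    · cases m with
      | zero =>
        have hstream : List.replicate 0 '*' ++ ((c :: cs).filter (fun c => PySem.Chars.isdigit c)).drop 0
            = c :: (List.replicate 0 '*' ++ (cs.filter (fun c => PySem.Chars.isdigit c)).drop 0) := by
          simp [hd]
        rw [hstream]
        simpa [pvStitch, pvMaskL, hd] using ih 0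
      | succ k =>
        have hstream : List.replicate (k+1) '*' ++ ((c :: cs).filter (fun c => PySem.Chars.isdigit c)).drop (k+1)
            = '*' :: (List.replicate k '*' ++ (cs.filter (fun c => PySem.Chars.isdigit c)).drop k) := by
          simp [List.replicate_succ, hd]
        rw [hstream]
        simpa [pvStitch, pvMaskL, hd] using ih k
    · simp [pvStitch, pvMaskL, hd, ih m]

-- A's loop, read from the right (foldr form of foldl over the reversed list)
theorem pvFold_eq_maskL (keep : Int) (l : List Char) :
    l.foldr
      (fun c (st : List Char × Int) =>
        if PySem.Chars.isdigit c && decide (st.2 < keep) then (st.1 ++ [c], st.2 + 1)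
        else if PySem.Chars.isdigit c then (st.1 ++ ['*'], st.2)
        else (st.1 ++ [c], st.2)) ([], 0)
      = ((pvMaskL l ((l.filter (fun c => PySem.Chars.isdigit c)).length - keep.toNat)).reverse,
         ((min (l.filter (fun c => PySem.Chars.isdigit c)).length keep.toNat : Nat) : Int)) := by
  induction l with
  | nil => simp [pvMaskL]
  | cons c cs ih =>
    rw [List.foldr_cons, ih]
    by_cases hd : PySem.Chars.isdigit c = true
    · have hfc : (c :: cs).filter (fun c => PySem.Chars.isdigit c)
          = c :: cs.filter (fun c => PySem.Chars.isdigit c) := by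
        simp [hd]
      rw [hfc]
      by_cases hlt : ((min (cs.filter (fun c => PySem.Chars.isdigit c)).length keep.toNat : Nat) : Int) < keep
      · have hc : (PySem.Chars.isdigit c
            && decide (((min (cs.filter (fun c => PySem.Chars.isdigit c)).length keep.toNat : Nat) : Int) < keep)) = true := by
          simp only [hd, Bool.true_and, decide_eq_true_eq]; exact hlt
        rw [if_pos hc]
        have h0 : (cs.filter (fun c => PySem.Chars.isdigit c)).length + 1 - keep.toNat = 0 := by omega
        have h0' : (cs.filter (fun c => PySem.Chars.isdigit c)).length - keep.toNat = 0 := by omega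
        have hmin : min ((cs.filter (fun c => PySem.Chars.isdigit c)).length + 1) keep.toNat
            = min (cs.filter (fun c => PySem.Chars.isdigit c)).length keep.toNat + 1 := by omega
        simp only [List.length_cons, h0, hmin, pvMaskL, hd, if_true, Nat.zero_sub, h0']
        simp
      · have hc : (PySem.Chars.isdigit c
            && decide (((min (cs.filter (fun c => PySem.Chars.isdigit c)).length keep.toNat : Nat) : Int) < keep)) = false := by
          simp only [hd, Bool.true_and, decide_eq_false_iff_not]; exact hlt
        rw [if_neg (by rw [hc]; exact Bool.false_ne_true), if_pos hd]
        have hge : (cs.filter (fun c => PySem.Chars.isdigit c)).length + 1 - keep.toNat ≠ 0 := by omega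
        have hpred : (cs.filter (fun c => PySem.Chars.isdigit c)).length + 1 - keep.toNat - 1
            = (cs.filter (fun c => PySem.Chars.isdigit c)).length - keep.toNat := by omega
        have hmin : min ((cs.filter (fun c => PySem.Chars.isdigit c)).length + 1) keep.toNat
            = min (cs.filter (fun c => PySem.Chars.isdigit c)).length keep.toNat := by omega
        simp only [List.length_cons, pvMaskL, hd, if_true, hge, if_false, hpred, hmin]
        simp
    · have hfc : (c :: cs).filter (fun c => PySem.Chars.isdigit c)
          = cs.filter (fun c => PySem.Chars.isdigit c) := by
        simp [hd]
      rw [hfc, if_neg (by simp [hd]), if_neg hd]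
      simp [pvMaskL, hd]

-- ===== VERDICT (by name: the statement is the Claim_ definition above) =====
theorem mask_digits_tail_py_spec : Claim_equal_mask_digits_tail_py := by
  intro value keep _
  unfold Spec_mask_digits_tail_py mask_digits_tail_py mask_digits_tail_py_alt
  simp only []
  set l := value.toList with hl
  set dl := (l.filter (fun c => PySem.Chars.isdigit c)).length with hdl
  by_cases hle : (dl : Int) ≤ keep
  · simp [hle]
  · have hpos : (0 : Int) ≤ (dl : Int) - max keep 0 := by omega
    simp only [hle, if_false]
    rw [List.foldl_reverse]
    rw [pvFold_eq_maskL keep l]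
    rw [List.reverse_reverse]
    congr 1
    have hslice : PySem.List.slice (l.filter (fun c => PySem.Chars.isdigit c))
        (some ((dl : Int) - max keep 0)) none
        = (l.filter (fun c => PySem.Chars.isdigit c)).drop ((dl : Int) - max keep 0).toNat := by
      have := PySem.List.slice_from_natCast (l.filter (fun c => PySem.Chars.isdigit c))
        ((dl : Int) - max keep 0).toNat
      rwa [Int.toNat_of_nonneg hpos] at this
    have hrep : PySem.List.pyRepeat ['*'] ((dl : Int) - max keep 0)
        = List.replicate ((dl : Int) - max keep 0).toNat '*' := PySem.List.pyRepeat_singleton _ _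
    rw [hslice, hrep, pvStitch_eq_maskL]
    have : ((dl : Int) - max keep 0).toNat = dl - keep.toNat := by omega
    rw [this]
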